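-- pv_equiv track=rewrite | github.com/EthanRossmath/Number-Factorer | Classical_Factoring/classical_shor_auxillaries/refine.py | consolidate_pairs
-- ===== SOURCE A (Python) =====
-- def consolidate_pairs(factor_list: list):
--     combine_dict = {}
--     for a in factor_list:
--         if a[0] in combine_dict:
--             combine_dict[a[0]] += a[1]
--         else:
--             combine_dict[a[0]] = a[1]
--     combine_list = []
--     for a in combine_dict:
--         combine_list.append((a, combine_dict[a]))
--
--     combine_list.sort(key=lambda x: x[0])
--     return combine_list
-- ===== SOURCE B (Python) =====
-- def consolidate_pairs(factor_list: list):
--     keys = sorted({a for a, _ in factor_list})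
--     return [(k, sum(b for a, b in factor_list if a == k)) for k in keys]
-- ===== Notes on version B (the rewrite author's own statement) =====
-- stated objective: simpler
-- what changed: Replaces the mutable-dict accumulation plus items-rebuild loop plus in-place sort with a two-line comprehension: sort the distinct keys once, then sum the matching second components per key.
import Mathlib
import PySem

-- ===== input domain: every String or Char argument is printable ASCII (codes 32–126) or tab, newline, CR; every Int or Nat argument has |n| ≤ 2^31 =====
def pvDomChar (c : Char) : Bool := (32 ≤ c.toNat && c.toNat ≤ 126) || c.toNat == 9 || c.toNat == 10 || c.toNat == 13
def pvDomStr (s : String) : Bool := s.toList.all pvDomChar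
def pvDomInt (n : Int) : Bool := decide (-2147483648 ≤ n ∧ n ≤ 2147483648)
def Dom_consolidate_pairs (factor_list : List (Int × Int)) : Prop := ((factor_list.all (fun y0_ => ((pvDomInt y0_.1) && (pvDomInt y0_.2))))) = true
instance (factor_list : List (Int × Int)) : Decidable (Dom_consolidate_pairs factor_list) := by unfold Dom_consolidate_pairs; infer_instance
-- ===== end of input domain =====

-- B is a simpler two-line re-implementation: sort the distinct keys, then sum matching values per key.

-- ===== PORT A =====
-- literal port of A: build a dict summing exponents, rebuild an item list, sort it by key
def consolidate_pairs (factor_list : List (Int × Int)) : List (Int × Int) :=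
  let combine_dict : PySem.Dict Int Int :=
    factor_list.foldl (fun d a =>
      if d.contains a.1 then d.insert a.1 (d.getD a.1 0 + a.2)
      else d.insert a.1 a.2) PySem.Dict.empty
  -- 'combine_dict[a]' for a key a of the dict: getD is exact here (a ∈ keys, so no KeyError)
  let combine_list : List (Int × Int) :=
    combine_dict.keys.foldl (fun acc a => acc ++ [(a, combine_dict.getD a 0)]) []
  PySem.List.sorted combine_list (fun x => x.1) false

-- ===== PORT B =====
def consolidate_pairs_alt (factor_list : List (Int × Int)) : List (Int × Int) :=
  let keys := PySem.List.sorted (PySem.Set.ofList (factor_list.map (·.1))) (fun x => x) false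
  keys.map (fun k => (k, ((factor_list.filter (fun p => p.1 == k)).map (·.2)).sum))

-- ===== PRECONDITION & SPEC =====
def Spec_consolidate_pairs (factor_list : List (Int × Int)) (out : List (Int × Int)) : Prop := out = consolidate_pairs_alt factor_list
instance (factor_list : List (Int × Int)) (out : List (Int × Int)) : Decidable (Spec_consolidate_pairs factor_list out) := by unfold Spec_consolidate_pairs; infer_instance

-- ===== CLAIM (what is proved, stated in full; the proofs are below) =====
def Claim_equal_consolidate_pairs : Prop := ∀ (factor_list : List (Int × Int)), Dom_consolidate_pairs factor_list → Spec_consolidate_pairs factor_list (consolidate_pairs factor_list)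

-- ===== LEMMAS AND PROOFS =====

-- A's loop body, written as a single insert at key a.1
theorem pv_step_eq (d : PySem.Dict Int Int) (a : Int × Int) :
    (if d.contains a.1 then d.insert a.1 (d.getD a.1 0 + a.2) else d.insert a.1 a.2)
      = d.insert a.1 (if d.contains a.1 then d.getD a.1 0 + a.2 else a.2) := by
  split_ifs <;> rfl

-- the value a key holds after A's whole accumulation loop
theorem pv_getD_foldl (l : List (Int × Int)) (c : Int) : ∀ d : PySem.Dict Int Int,
    (l.foldl (fun d a =>
        if d.contains a.1 then d.insert a.1 (d.getD a.1 0 + a.2) else d.insert a.1 a.2) d).getD c 0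
      = d.getD c 0 + ((l.filter (fun p => p.1 == c)).map (·.2)).sum := by
  induction l with
  | nil => intro d; simp
  | cons p t ih =>
    intro d
    simp only [List.foldl_cons, List.filter_cons]
    rw [pv_step_eq, ih]
    by_cases hpc : p.1 = c
    · subst hpc
      rw [PySem.Dict.getD_insert]
      simp only [beq_self_eq_true, if_pos, List.map_cons, List.sum_cons]
      by_cases hc : d.contains p.1 = true
      · rw [if_pos hc]; ring
      · rw [if_neg hc, PySem.Dict.getD_of_not_contains _ _ (by simpa using hc)]; ring
    · rw [PySem.Dict.getD_insert, if_neg (fun h => hpc h.symm)]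
      simp [hpc]

-- the item-rebuilding loop is a map over the keys
theorem pv_foldl_append_map {α β : Type} (g : α → β) (ks : List α) :
    ∀ acc : List β, ks.foldl (fun acc a => acc ++ [g a]) acc = acc ++ ks.map g := by
  induction ks with
  | nil => intro acc; simp
  | cons k t ih => intro acc; simp [ih]

theorem consolidate_pairs_eq (factor_list : List (Int × Int)) :
    consolidate_pairs factor_list = consolidate_pairs_alt factor_list := by
  unfold consolidate_pairs consolidate_pairs_alt
  simp only []
  set S : Int → Int := fun k => ((factor_list.filter (fun p => p.1 == k)).map (·.2)).sum with hS
  set KS : List Int := PySem.Set.ofList (factor_list.map (·.1)) with hKS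
  have hstep : (fun (d : PySem.Dict Int Int) (a : Int × Int) =>
      if d.contains a.1 then d.insert a.1 (d.getD a.1 0 + a.2) else d.insert a.1 a.2)
      = fun d a => d.insert a.1 (if d.contains a.1 then d.getD a.1 0 + a.2 else a.2) := by
    funext d a; exact pv_step_eq d a
  have hkeys : (factor_list.foldl (fun d a =>
      if d.contains a.1 then d.insert a.1 (d.getD a.1 0 + a.2) else d.insert a.1 a.2)
      PySem.Dict.empty).keys = KS := by
    rw [hstep, PySem.Dict.keys_foldl_insert_key]
    simp [PySem.Dict.keys_empty, PySem.Set.update_nil_left, hKS]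
  have hval : ∀ c : Int, (factor_list.foldl (fun d a =>
      if d.contains a.1 then d.insert a.1 (d.getD a.1 0 + a.2) else d.insert a.1 a.2)
      PySem.Dict.empty).getD c 0 = S c := by
    intro c; rw [pv_getD_foldl]; simp [hS]
  rw [pv_foldl_append_map, hkeys]
  have hmap : KS.map (fun a => (a, (factor_list.foldl (fun d a =>
      if d.contains a.1 then d.insert a.1 (d.getD a.1 0 + a.2) else d.insert a.1 a.2)
      PySem.Dict.empty).getD a 0)) = KS.map (fun k => (k, S k)) := by
    apply List.map_congr_left; intro k _; rw [hval]
  rw [List.nil_append, hmap]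
  -- B's result is a strictly-key-increasing rearrangement of A's unsorted item list
  apply PySem.List.sorted_eq_of_perm_of_pairwise_lt
  · exact List.Perm.map _ (PySem.List.sorted_perm _ _ _)
  · have h : (PySem.List.sorted KS (fun x => x) false).Pairwise (· < ·) := by
      rw [hKS]; exact PySem.List.sorted_ofList_pairwise_lt _
    exact List.pairwise_map.mpr (by simpa using h)

-- ===== VERDICT (by name: the statement is the Claim_ definition above) =====
theorem consolidate_pairs_spec : Claim_equal_consolidate_pairs := by
  intro factor_list _
  unfold Spec_consolidate_pairs
  exact consolidate_pairs_eq factor_list
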